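-- pv_equiv track=rewrite | github.com/ljramones/mcp_sensebank | sense_ingest_docs/reporting.py | summarize_cats
-- ===== SOURCE A (Python) =====
-- from typing import Dict, List, Optional, Tuple
--
-- def summarize_cats(d: Dict[str, int]) -> str:
--     """
--     Summarizes the given categories in a predefined order and includes any additional
--     categories not defined in the order. The resulting summary is a comma-separated
--     string with each category and its associated value.
--
--     :param d: Dictionary of categories (str) with their associated integer values.
--     :type d: Dict[str, int]
--     :return: A string summarizing the categories and their values.
--     :rtype: str
--     """
--     if not d:
--         return "-"
--
--     order = ["smell", "sound", "taste", "touch", "sight"]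
--     parts = [f"{k}:{d.get(k, 0)}" for k in order if k in d or d.get(k, 0)]
--
--     # add any other stray categories
--     for k, v in d.items():
--         if k not in order:
--             parts.append(f"{k}:{v}")
--
--     return ", ".join(parts) if parts else "-"
-- ===== SOURCE B (Python) =====
-- def summarize_cats(d):
--     if not d:
--         return "-"
--     order = ["smell", "sound", "taste", "touch", "sight"]
--     rank = {name: i for i, name in enumerate(order)}
--     buckets = [[] for _ in range(len(order) + 1)]
--     for k, v in d.items():
--         buckets[rank.get(k, len(order))].append(f"{k}:{v}")
--     return ", ".join(part for b in buckets for part in b)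
-- ===== Notes on version B (the rewrite author's own statement) =====
-- stated objective: alternative
-- what changed: Instead of scanning the preset-order list with membership/get lookups and then re-scanning the dict for strays, B makes one pass over the dict, distributing each item into one of six rank buckets (preset rank or 'stray'), and joins the flattened buckets.
import Mathlib
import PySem

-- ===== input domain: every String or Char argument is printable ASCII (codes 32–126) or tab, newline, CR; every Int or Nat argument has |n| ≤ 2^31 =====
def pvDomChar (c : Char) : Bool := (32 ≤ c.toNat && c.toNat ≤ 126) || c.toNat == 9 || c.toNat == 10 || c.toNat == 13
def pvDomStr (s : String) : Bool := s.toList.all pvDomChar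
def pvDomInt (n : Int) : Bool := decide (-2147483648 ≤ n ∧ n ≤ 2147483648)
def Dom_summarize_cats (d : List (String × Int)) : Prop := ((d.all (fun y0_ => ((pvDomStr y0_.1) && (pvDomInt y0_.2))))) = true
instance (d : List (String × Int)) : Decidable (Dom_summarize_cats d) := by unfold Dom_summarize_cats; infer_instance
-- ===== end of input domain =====

-- B replaces A's preset-order scan with membership tests plus a second stray pass by a
-- single pass over the dict distributing items into six rank buckets (objective: alternative).

-- ===== PORT A =====
def summarize_cats (d : List (String × Int)) : String :=
  if d = [] then "-"
  else
    let dd := PySem.Dict.mk d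
    let order : List String := ["smell", "sound", "taste", "touch", "sight"]
    -- parts = [f"{k}:{d.get(k, 0)}" for k in order if k in d or d.get(k, 0)]
    let parts := (order.filter (fun k => dd.contains k || decide (dd.getD k 0 ≠ 0))).map
        (fun k => k ++ ":" ++ PySem.Int.toStr (dd.getD k 0))
    -- for k, v in d.items(): if k not in order: parts.append(f"{k}:{v}")
    let parts := dd.items.foldl
        (fun ps kv => if !(order.contains kv.1) then ps ++ [kv.1 ++ ":" ++ PySem.Int.toStr kv.2] else ps)
        parts
    if parts = [] then "-" else PySem.Str.join ", " parts

-- ===== PORT B =====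
def summarize_cats_alt (d : List (String × Int)) : String :=
  if d = [] then "-"
  else
    let order : List String := ["smell", "sound", "taste", "touch", "sight"]
    -- rank = {name: i for i, name in enumerate(order)}
    let rank := PySem.Dict.mk ((PySem.List.enumerate order).map (fun p => (p.2, p.1)))
    -- buckets = [[] for _ in range(len(order) + 1)]
    let buckets : List (List String) := List.replicate (order.length + 1) []
    -- for k, v in d.items(): buckets[rank.get(k, len(order))].append(f"{k}:{v}")
    -- (rank values are 0..5, so the Int → Nat index conversion is exact)
    let buckets := (PySem.Dict.mk d).items.foldl
        (fun bs kv =>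
          let i := (rank.getD kv.1 (order.length : Int)).toNat
          bs.set i (bs.getD i [] ++ [kv.1 ++ ":" ++ PySem.Int.toStr kv.2]))
        buckets
    PySem.Str.join ", " buckets.flatten

-- ===== PRECONDITION & SPEC =====
-- The association list encodes a Python dict, whose keys are necessarily distinct;
-- Pre_ states exactly that (duplicate keys do not correspond to any Python input).
def Pre_summarize_cats (d : List (String × Int)) : Prop := (d.map Prod.fst).Nodup
instance (d : List (String × Int)) : Decidable (Pre_summarize_cats d) := by unfold Pre_summarize_cats; infer_instance
def pvWitness_summarize_cats : (List (String × Int)) := [("sound", 2), ("zzz", -1), ("smell", 0)]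

def Spec_summarize_cats (d : List (String × Int)) (out : String) : Prop := out = summarize_cats_alt d
instance (d : List (String × Int)) (out : String) : Decidable (Spec_summarize_cats d out) := by unfold Spec_summarize_cats; infer_instance

-- ===== CLAIM (what is proved, stated in full; the proofs are below) =====
def Claim_equal_summarize_cats : Prop := ∀ (d : List (String × Int)), Dom_summarize_cats d → Pre_summarize_cats d → Spec_summarize_cats d (summarize_cats d)

-- ===== LEMMAS AND PROOFS =====

def pvFmt (kv : String × Int) : String := kv.1 ++ ":" ++ PySem.Int.toStr kv.2

def pvRank (k : String) : Nat :=
  ((PySem.Dict.mk ((PySem.List.enumerate ["smell","sound","taste","touch","sight"]).map (fun p : Int × String => (p.2, p.1)))).getD k 5).toNat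

lemma pvRank_eq (k : String) : pvRank k =
    if k = "smell" then 0 else if k = "sound" then 1 else if k = "taste" then 2
    else if k = "touch" then 3 else if k = "sight" then 4 else 5 := by
  unfold pvRank
  simp only [PySem.List.enumerate_cons, PySem.List.enumerate_nil, List.map_cons, List.map_nil,
    PySem.Dict.getD, PySem.Dict.get?_mk_cons]
  split_ifs <;> simp_all [PySem.Dict.get?]

lemma pvBuckets_getD (f : String × Int → String) (r : String × Int → Nat) :
    ∀ (l : List (String × Int)) (bs : List (List String)),
      (∀ kv ∈ l, r kv < bs.length) → ∀ i,
      (l.foldl (fun bs kv => bs.set (r kv) (bs.getD (r kv) [] ++ [f kv])) bs).getD i []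
        = bs.getD i [] ++ (l.filter (fun kv => r kv == i)).map f := by
  intro l
  induction l with
  | nil => intro bs _ i; simp
  | cons kv t ih =>
    intro bs h i
    simp only [List.foldl_cons, List.filter_cons]
    rw [ih _ (by intro x hx; rw [List.length_set]; exact h x (List.mem_cons_of_mem _ hx))]
    by_cases hi : r kv = i
    · subst hi
      rw [List.getD_eq_getElem?_getD, List.getElem?_set_self (h kv (List.mem_cons_self))]
      simp [List.getD_eq_getElem?_getD]
    · rw [List.getD_eq_getElem?_getD, List.getElem?_set_ne hi]
      simp [List.getD_eq_getElem?_getD, hi]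

lemma pvBuckets_length (f : String × Int → String) (r : String × Int → Nat) :
    ∀ (l : List (String × Int)) (bs : List (List String)),
      (l.foldl (fun bs kv => bs.set (r kv) (bs.getD (r kv) [] ++ [f kv])) bs).length = bs.length := by
  intro l
  induction l with
  | nil => intro bs; rfl
  | cons kv t ih => intro bs; rw [List.foldl_cons, ih, List.length_set]

lemma pvFlatten6 (l : List (List String)) (h : l.length = 6) :
    l.flatten = l.getD 0 [] ++ (l.getD 1 [] ++ (l.getD 2 [] ++ (l.getD 3 [] ++ (l.getD 4 [] ++ l.getD 5 [])))) := by
  match l, h with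
  | [a, b, c, d, e, f], _ => simp

lemma pvFilter_nodup (k : String) :
    ∀ (d : List (String × Int)), (d.map Prod.fst).Nodup →
      d.filter (fun kv => kv.1 == k)
        = (match (PySem.Dict.mk d).get? k with | some v => [(k, v)] | none => []) := by
  intro d
  induction d with
  | nil => intro _; simp [PySem.Dict.get?]
  | cons a t ih =>
    intro h
    rw [List.map_cons, List.nodup_cons] at h
    rw [List.filter_cons, PySem.Dict.get?_mk_cons]
    by_cases hk : a.1 = k
    · subst hk
      have : t.filter (fun kv => kv.1 == a.1) = [] := by
        rw [List.filter_eq_nil_iff]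
        intro x hx
        simp only [beq_iff_eq]
        exact fun he => h.1 (he ▸ List.mem_map_of_mem hx)
      simp [this]
    · have hb : (a.1 == k) = false := beq_eq_false_iff_ne.mpr hk
      rw [hb]
      simp only [Bool.false_eq_true, if_false]
      exact ih h.2

lemma pvRank_p0 (k : String) : (pvRank k == 0) = (k == "smell") := by
  rw [pvRank_eq]; split_ifs <;> simp_all
lemma pvRank_p1 (k : String) : (pvRank k == 1) = (k == "sound") := by
  rw [pvRank_eq]; split_ifs <;> simp_all
lemma pvRank_p2 (k : String) : (pvRank k == 2) = (k == "taste") := by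
  rw [pvRank_eq]; split_ifs <;> simp_all
lemma pvRank_p3 (k : String) : (pvRank k == 3) = (k == "touch") := by
  rw [pvRank_eq]; split_ifs <;> simp_all
lemma pvRank_p4 (k : String) : (pvRank k == 4) = (k == "sight") := by
  rw [pvRank_eq]; split_ifs <;> simp_all
lemma pvRank_p5 (k : String) :
    (pvRank k == 5) = !((["smell","sound","taste","touch","sight"] : List String).contains k) := by
  rw [pvRank_eq]; split_ifs <;> simp_all
lemma pvRank_lt (kv : String × Int) : pvRank kv.1 < 6 := by
  rw [pvRank_eq]; split_ifs <;> omega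

lemma pvPreset (d : List (String × Int)) (h : (d.map Prod.fst).Nodup) (k : String) :
    (if ((PySem.Dict.mk d).contains k || decide ((PySem.Dict.mk d).getD k 0 ≠ 0))
      then [k ++ ":" ++ PySem.Int.toStr ((PySem.Dict.mk d).getD k 0)] else [])
      = (d.filter (fun kv => kv.1 == k)).map pvFmt := by
  rw [pvFilter_nodup k d h]
  cases hg : (PySem.Dict.mk d).get? k with
  | some v =>
      have hc : (PySem.Dict.mk d).contains k = true := by
        rw [PySem.Dict.contains_eq_isSome_get?, hg]; rfl
      have hgd : (PySem.Dict.mk d).getD k 0 = v := by rw [PySem.Dict.getD_eq_get?_getD, hg]; rfl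
      simp [hc, hgd, pvFmt]
  | none =>
      have hc : (PySem.Dict.mk d).contains k = false := by
        rw [PySem.Dict.contains_eq_isSome_get?, hg]; rfl
      have hgd : (PySem.Dict.mk d).getD k 0 = 0 := by
        rw [PySem.Dict.getD_eq_get?_getD, hg]; rfl
      simp [hc, hgd]


def pvPartsA (d : List (String × Int)) : List String :=
  let dd := PySem.Dict.mk d
  let order : List String := ["smell", "sound", "taste", "touch", "sight"]
  dd.items.foldl
    (fun ps kv => if !(order.contains kv.1) then ps ++ [kv.1 ++ ":" ++ PySem.Int.toStr kv.2] else ps)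
    ((order.filter (fun k => dd.contains k || decide (dd.getD k 0 ≠ 0))).map
        (fun k => k ++ ":" ++ PySem.Int.toStr (dd.getD k 0)))

lemma pvFM (p : String → Bool) (f : String → String) (a b c d e : String) :
    (([a,b,c,d,e].filter p).map f)
      = (if p a then [f a] else []) ++ ((if p b then [f b] else []) ++ ((if p c then [f c] else [])
        ++ ((if p d then [f d] else []) ++ (if p e then [f e] else [])))) := by
  simp only [List.filter_cons, List.filter_nil]
  split_ifs <;> simp

lemma pvPartsA_eq (d : List (String × Int)) (hpre : (d.map Prod.fst).Nodup) :
    pvPartsA d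
    = ((d.filter (fun kv => pvRank kv.1 == 0)).map pvFmt)
      ++ (((d.filter (fun kv => pvRank kv.1 == 1)).map pvFmt)
      ++ (((d.filter (fun kv => pvRank kv.1 == 2)).map pvFmt)
      ++ (((d.filter (fun kv => pvRank kv.1 == 3)).map pvFmt)
      ++ (((d.filter (fun kv => pvRank kv.1 == 4)).map pvFmt)
      ++ ((d.filter (fun kv => pvRank kv.1 == 5)).map pvFmt))))) := by
  unfold pvPartsA
  show (List.foldl (fun ps kv => if (fun kv : String × Int => !((["smell","sound","taste","touch","sight"] : List String).contains kv.1)) kv then ps ++ [pvFmt kv] else ps) _ d) = _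
  rw [PySem.List.foldl_append_if]
  rw [pvFM]
  rw [pvPreset d hpre "smell", pvPreset d hpre "sound", pvPreset d hpre "taste",
      pvPreset d hpre "touch", pvPreset d hpre "sight"]
  have hstray : d.filter (fun kv => !((["smell","sound","taste","touch","sight"] : List String).contains kv.1))
      = d.filter (fun kv => pvRank kv.1 == 5) := by
    apply List.filter_congr
    intro kv _
    rw [pvRank_p5]
  rw [hstray]
  have h0 : d.filter (fun kv => kv.1 == "smell") = d.filter (fun kv => pvRank kv.1 == 0) :=
    List.filter_congr (fun kv _ => by rw [pvRank_p0])
  have h1 : d.filter (fun kv => kv.1 == "sound") = d.filter (fun kv => pvRank kv.1 == 1) :=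
    List.filter_congr (fun kv _ => by rw [pvRank_p1])
  have h2 : d.filter (fun kv => kv.1 == "taste") = d.filter (fun kv => pvRank kv.1 == 2) :=
    List.filter_congr (fun kv _ => by rw [pvRank_p2])
  have h3 : d.filter (fun kv => kv.1 == "touch") = d.filter (fun kv => pvRank kv.1 == 3) :=
    List.filter_congr (fun kv _ => by rw [pvRank_p3])
  have h4 : d.filter (fun kv => kv.1 == "sight") = d.filter (fun kv => pvRank kv.1 == 4) :=
    List.filter_congr (fun kv _ => by rw [pvRank_p4])
  rw [h0, h1, h2, h3, h4]
  simp [List.append_assoc]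

lemma pvAltFold (l : List (String × Int)) :
    (l.foldl (fun bs kv =>
        bs.set (pvRank kv.1) (bs.getD (pvRank kv.1) [] ++ [pvFmt kv]))
      (List.replicate 6 [])).flatten
    = ((l.filter (fun kv => pvRank kv.1 == 0)).map pvFmt)
      ++ (((l.filter (fun kv => pvRank kv.1 == 1)).map pvFmt)
      ++ (((l.filter (fun kv => pvRank kv.1 == 2)).map pvFmt)
      ++ (((l.filter (fun kv => pvRank kv.1 == 3)).map pvFmt)
      ++ (((l.filter (fun kv => pvRank kv.1 == 4)).map pvFmt)
      ++ ((l.filter (fun kv => pvRank kv.1 == 5)).map pvFmt))))) := by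
  rw [pvFlatten6 _ (by rw [pvBuckets_length]; rfl)]
  have hr : ∀ kv ∈ l, (fun kv : String × Int => pvRank kv.1) kv < (List.replicate 6 ([] : List String)).length := by
    intro kv _; simpa using pvRank_lt kv
  simp only [pvBuckets_getD pvFmt (fun kv => pvRank kv.1) l _ hr]
  simp

theorem pv_main (d : List (String × Int)) (hpre : (d.map Prod.fst).Nodup) :
    summarize_cats d = summarize_cats_alt d := by
  by_cases hd : d = []
  · simp [hd, summarize_cats, summarize_cats_alt]
  · have hBeq : summarize_cats_alt d = PySem.Str.join ", "
        ((d.foldl (fun bs kv =>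
            bs.set (pvRank kv.1) (bs.getD (pvRank kv.1) [] ++ [pvFmt kv]))
          (List.replicate 6 [])).flatten) := by
      unfold summarize_cats_alt
      rw [if_neg hd]
      rfl
    have hAeq : summarize_cats d = (if pvPartsA d = [] then "-" else PySem.Str.join ", " (pvPartsA d)) := by
      unfold summarize_cats
      rw [if_neg hd]
      rfl
    rw [hBeq, pvAltFold, hAeq, pvPartsA_eq d hpre]
    rw [if_neg ?hne]
    case hne =>
      obtain ⟨kv, t, rfl⟩ : ∃ kv t, d = kv :: t := by
        cases d with
        | nil => exact absurd rfl hd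
        | cons kv t => exact ⟨kv, t, rfl⟩
      have hlt := pvRank_lt kv
      apply List.ne_nil_of_mem (a := pvFmt kv)
      have hmem : ∀ i, pvRank kv.1 = i →
          pvFmt kv ∈ ((kv :: t).filter (fun kv' => pvRank kv'.1 == i)).map pvFmt := by
        intro i hi
        exact List.mem_map_of_mem (List.mem_filter.mpr ⟨List.mem_cons_self, by simp [hi]⟩)
      simp only [List.mem_append]
      interval_cases h : pvRank kv.1 <;>
        [exact Or.inl (hmem 0 rfl); exact Or.inr (Or.inl (hmem 1 rfl));
         exact Or.inr (Or.inr (Or.inl (hmem 2 rfl)));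
         exact Or.inr (Or.inr (Or.inr (Or.inl (hmem 3 rfl))));
         exact Or.inr (Or.inr (Or.inr (Or.inr (Or.inl (hmem 4 rfl)))));
         exact Or.inr (Or.inr (Or.inr (Or.inr (Or.inr (hmem 5 rfl)))))]

-- ===== VERDICT (by name: the statement is the Claim_ definition above) =====
theorem summarize_cats_spec : Claim_equal_summarize_cats := by
  intro d _ hpre
  unfold Spec_summarize_cats
  exact pv_main d hpre
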